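-- pv_equiv track=rewrite | github.com/firuz-backend/algorithms-and-data-structures | additional_lessons/topics/creating_generators/generator_palindromes.py | is_palindrom_str
-- ===== SOURCE A (Python) =====
-- def is_palindrom_str(length):
--     if length == 1:
--         yield from map(lambda i: str(i), range(0, 10))
--     elif length == 2:
--         yield from map(lambda i: str(i) + str(i), range(0, 10))
--     elif length > 2:
--         yield from (
--             str(n) + i + str(n)
--             for n in range(0, 10)
--             for i in is_palindrom_str(length-2)
--         )
-- ===== SOURCE B (Python) =====
-- def is_palindrom_str(length):
--     # Build the first halves iteratively (lexicographic order), then mirror each.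
--     if length <= 0:
--         return
--     halves = ['']
--     for _ in range((length + 1) // 2):
--         halves = [h + d for h in halves for d in '0123456789']
--     mirror = length // 2
--     for h in halves:
--         yield h + h[:mirror][::-1]
-- ===== Notes on version B (the rewrite author's own statement) =====
-- stated objective: alternative
-- what changed: Replaced A's recursive wrap-the-inner-palindrome generator with an iterative construction that enumerates all digit halves of length ceil(n/2) and mirrors each half once.
import Mathlib
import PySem

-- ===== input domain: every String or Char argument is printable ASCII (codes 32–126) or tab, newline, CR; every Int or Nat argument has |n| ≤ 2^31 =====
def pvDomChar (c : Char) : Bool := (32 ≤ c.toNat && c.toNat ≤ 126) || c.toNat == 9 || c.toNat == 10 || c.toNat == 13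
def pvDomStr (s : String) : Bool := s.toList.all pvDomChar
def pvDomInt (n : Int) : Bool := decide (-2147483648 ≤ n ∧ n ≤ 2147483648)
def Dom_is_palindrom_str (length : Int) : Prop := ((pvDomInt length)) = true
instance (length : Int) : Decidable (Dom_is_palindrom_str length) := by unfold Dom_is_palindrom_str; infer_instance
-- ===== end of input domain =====

-- B replaces A's recursive wrap-the-inner-palindrome generation by an iterative
-- enumeration of the digit halves, mirroring each half once (alternative decomposition,
-- similar cost).

-- ===== PORT A =====
-- str(n) + i + str(n) is ported as String.ofList of the concatenated char lists (exact).
def is_palindrom_str (length : Int) : List String :=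
  if length = 1 then
    (PySem.List.pyRange 0 10 1).map (fun i => PySem.Int.toStr i)
  else if length = 2 then
    (PySem.List.pyRange 0 10 1).map (fun i =>
      String.ofList (PySem.Int.toChars i ++ PySem.Int.toChars i))
  else if 2 < length then
    (PySem.List.pyRange 0 10 1).flatMap (fun n =>
      (is_palindrom_str (length - 2)).map (fun i =>
        String.ofList (PySem.Int.toChars n ++ i.toList ++ PySem.Int.toChars n)))
  else []
termination_by length.toNat
decreasing_by omega

-- ===== PORT B =====
-- the digit characters '0'..'9' iterated over by Source B's inner comprehension
def pvDigits : List Char := ['0', '1', '2', '3', '4', '5', '6', '7', '8', '9']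

-- one pass of Source B's loop body: halves = [h + d for h in halves for d in '0123456789']
def pvStep (hs : List (List Char)) : List (List Char) :=
  hs.flatMap (fun h => pvDigits.map (fun d => h ++ [d]))

-- h[:length//2][::-1] is ported as reverse of the slice
def is_palindrom_str_alt (length : Int) : List String :=
  if length ≤ 0 then []
  else
    ((PySem.List.pyRange 0 (PySem.Int.floordiv (length + 1) 2) 1).foldl
        (fun hs _ => pvStep hs) ([[]] : List (List Char))).map
      (fun h => String.ofList
        (h ++ (PySem.List.slice h none (some (PySem.Int.floordiv length 2))).reverse))

-- ===== PRECONDITION & SPEC =====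
-- A nests one generator per recursive wrap (about two CPython stack frames per level):
-- beyond the bound below the very first next() exceeds CPython's default 1000-frame
-- recursion limit and A raises RecursionError before yielding anything (measured: A
-- starts yielding for every length up to the bound and raises above it); Pre_ excludes
-- exactly those raising lengths and no input on which A yields.
def Pre_is_palindrom_str (length : Int) : Prop := length ≤ 996
instance (length : Int) : Decidable (Pre_is_palindrom_str length) := by unfold Pre_is_palindrom_str; infer_instance
def pvWitness_is_palindrom_str : Int := 5
def Spec_is_palindrom_str (length : Int) (out : List String) : Prop := out = is_palindrom_str_alt length
instance (length : Int) (out : List String) : Decidable (Spec_is_palindrom_str length out) := by unfold Spec_is_palindrom_str; infer_instance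

-- ===== CLAIM =====
def Claim_equal_is_palindrom_str : Prop := ∀ (length : Int), Dom_is_palindrom_str length → Pre_is_palindrom_str length → Spec_is_palindrom_str length (is_palindrom_str length)

-- ===== LEMMAS AND PROOFS =====

-- the halves list after k iterations of Source B's loop
def pvG : Nat → List (List Char)
  | 0 => [[]]
  | k + 1 => pvStep (pvG k)

lemma pvFoldl_eq_pvG (k : Nat) :
    (PySem.List.pyRange 0 (k : Int) 1).foldl (fun hs _ => pvStep hs) [[]] = pvG k := by
  induction k with
  | zero =>
    rw [PySem.List.pyRange_one_eq_nil (by omega)]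
    rfl
  | succ k ih =>
    rw [show ((k + 1 : Nat) : Int) = (k : Int) + 1 by push_cast; ring,
      PySem.List.pyRange_one_succ_right (by omega), List.foldl_append]
    simp only [List.foldl_cons, List.foldl_nil, ih, pvG]

-- the append-at-the-end construction equals the prepend-at-the-front decomposition
lemma pvG_succ_eq_flatMap (k : Nat) :
    pvG (k + 1) = pvDigits.flatMap (fun d => (pvG k).map (fun h => d :: h)) := by
  induction k with
  | zero => decide
  | succ k ih =>
    calc pvG (k + 1 + 1) = pvStep (pvG (k + 1)) := rfl
      _ = pvStep (pvDigits.flatMap (fun d => (pvG k).map (fun h => d :: h))) := by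
            rw [ih]
      _ = pvDigits.flatMap (fun d => ((pvG k).map (fun h => d :: h)).flatMap
            (fun h => pvDigits.map (fun e => h ++ [e]))) := by
            rw [pvStep, List.flatMap_assoc]
      _ = pvDigits.flatMap (fun d => (pvG k).flatMap
            (fun h => pvDigits.map (fun e => (d :: h) ++ [e]))) := by
            apply List.flatMap_congr
            intro d _
            rw [List.flatMap_map]
      _ = pvDigits.flatMap (fun d => ((pvG k).flatMap
            (fun h => pvDigits.map (fun e => h ++ [e]))).map (fun h => d :: h)) := by
            apply List.flatMap_congr
            intro d _
            rw [List.map_flatMap]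
            apply List.flatMap_congr
            intro h _
            rw [List.map_map]
            rfl
      _ = pvDigits.flatMap (fun d => (pvG (k + 1)).map (fun h => d :: h)) := rfl

-- Source B for 0 < length, with its half-count named: map of the mirroring over pvG K
lemma pvAlt_eq (l : Int) (hl : 0 < l) (K : Nat)
    (hK : PySem.Int.floordiv (l + 1) 2 = (K : Int)) :
    is_palindrom_str_alt l = (pvG K).map (fun h => String.ofList
      (h ++ (PySem.List.slice h none (some (PySem.Int.floordiv l 2))).reverse)) := by
  rw [is_palindrom_str_alt, if_neg (by omega), hK, pvFoldl_eq_pvG]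

-- range(0, 10) traversed through str(n) is exactly the digit characters
lemma pvRange10_flatMap (F : List Char → List String) :
    (PySem.List.pyRange 0 10 1).flatMap (fun n => F (PySem.Int.toChars n))
      = pvDigits.flatMap (fun d => F [d]) := rfl

lemma pvA_nonpos (l : Int) (hl : l ≤ 0) :
    is_palindrom_str l = is_palindrom_str_alt l := by
  rw [is_palindrom_str, is_palindrom_str_alt, if_neg (by omega : ¬ l = 1),
    if_neg (by omega : ¬ l = 2), if_neg (by omega : ¬ 2 < l), if_pos hl]

lemma pvMain : ∀ (m : Nat) (l : Int), l.toNat ≤ m →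
    is_palindrom_str l = is_palindrom_str_alt l := by
  intro m
  induction m with
  | zero =>
    intro l hl
    exact pvA_nonpos l (by omega)
  | succ m ih =>
    intro l hl
    by_cases hl0 : l ≤ 0
    · exact pvA_nonpos l hl0
    · by_cases he1 : l = 1
      · subst he1
        rw [is_palindrom_str, if_pos rfl]
        decide
      · by_cases he2 : l = 2
        · subst he2
          rw [is_palindrom_str, if_neg (by norm_num), if_pos rfl]
          decide
        · -- l > 2: both sides satisfy the same recurrence on length - 2
          have hl3 : 3 ≤ l := by omega
          have hfd1 : PySem.Int.floordiv (l + 1) 2 = (l + 1) / 2 :=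
            PySem.Int.floordiv_eq_ediv_of_pos (by norm_num)
          have hfd2 : PySem.Int.floordiv (l - 2 + 1) 2 = (l - 2 + 1) / 2 :=
            PySem.Int.floordiv_eq_ediv_of_pos (by norm_num)
          have hfd3 : PySem.Int.floordiv l 2 = l / 2 :=
            PySem.Int.floordiv_eq_ediv_of_pos (by norm_num)
          have hfd4 : PySem.Int.floordiv (l - 2) 2 = (l - 2) / 2 :=
            PySem.Int.floordiv_eq_ediv_of_pos (by norm_num)
          set K : Nat := ((l + 1) / 2).toNat with hKdef
          set M : Nat := (l / 2).toNat with hMdef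
          have hK2 : 2 ≤ K := by omega
          have hM1 : 1 ≤ M := by omega
          have hKc : PySem.Int.floordiv (l + 1) 2 = (K : Int) := by rw [hfd1]; omega
          have hK1c : PySem.Int.floordiv (l - 2 + 1) 2 = ((K - 1 : Nat) : Int) := by
            rw [hfd2]; omega
          have hb1 : PySem.Int.floordiv (l - 2) 2 = ((M - 1 : Nat) : Int) := by
            rw [hfd4]; omega
          have hb2 : PySem.Int.floordiv l 2 = ((M : Nat) : Int) := by rw [hfd3]; omega
          have ihA : is_palindrom_str (l - 2) = is_palindrom_str_alt (l - 2) :=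
            ih (l - 2) (by omega)
          have hpv : pvG K = pvDigits.flatMap (fun d => (pvG (K - 1)).map
              (fun h => d :: h)) := by
            obtain ⟨K', hK'⟩ : ∃ K', K = K' + 1 := ⟨K - 1, by omega⟩
            rw [hK']
            exact pvG_succ_eq_flatMap K'
          rw [is_palindrom_str, if_neg he1, if_neg he2, if_pos (by omega : 2 < l),
            ihA, pvAlt_eq (l - 2) (by omega) (K - 1) hK1c,
            pvAlt_eq l (by omega) K hKc, hpv, List.map_flatMap]
          rw [pvRange10_flatMap (fun cs => ((pvG (K - 1)).map (fun h => String.ofList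
            (h ++ (PySem.List.slice h none
              (some (PySem.Int.floordiv (l - 2) 2))).reverse))).map (fun i =>
            String.ofList (cs ++ i.toList ++ cs)))]
          apply List.flatMap_congr
          intro d _
          rw [List.map_map, List.map_map]
          apply List.map_congr_left
          intro h _
          simp only [Function.comp_apply, String.toList_ofList, hb1, hb2,
            PySem.List.slice_to_natCast]
          rw [show M = (M - 1) + 1 by omega, List.take_succ_cons]
          simp [List.reverse_cons, List.append_assoc]

-- ===== VERDICT =====
theorem is_palindrom_str_spec : Claim_equal_is_palindrom_str := by
  intro l _ _
  unfold Spec_is_palindrom_str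
  exact pvMain l.toNat l le_rfl
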